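-- pv_equiv track=rewrite | github.com/llongagoo/xinxineironganzuan | byes.py | get_bool
-- ===== SOURCE A (Python) =====
-- def get_bool(mail_list,word_bag,label):
--     word_bool = []
--     for mail in mail_list:
--         mail_bool = []
--         word_list = mail.split()
--         for i in word_bag:
--             if i in word_list:
--                 mail_bool.append(1)
--             else:
--                 mail_bool.append(0)
--         word_bool.append(mail_bool)
--     return word_bool,label
-- ===== SOURCE B (Python) =====
-- def get_bool(mail_list, word_bag, label):
--     # Invert the scan: index the bag once (word -> its column indices),
--     # then scatter 1s per mail by looking up only the mail's own words.
--     cols = {}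
--     for j, w in enumerate(word_bag):
--         cols.setdefault(w, []).append(j)
--     n = len(word_bag)
--     word_bool = []
--     for mail in mail_list:
--         row = [0] * n
--         for w in mail.split():
--             for j in cols.get(w, []):
--                 row[j] = 1
--         word_bool.append(row)
--     return word_bool, label
-- ===== Notes on version B (the rewrite author's own statement) =====
-- stated objective: faster
-- what changed: B builds a word->column-indices dict over the bag once and, per mail, scatters 1s into a preallocated zero row by looking up only the mail's own words, instead of A's per-mail membership scan of the whole bag against the word list.
import Mathlib
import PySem

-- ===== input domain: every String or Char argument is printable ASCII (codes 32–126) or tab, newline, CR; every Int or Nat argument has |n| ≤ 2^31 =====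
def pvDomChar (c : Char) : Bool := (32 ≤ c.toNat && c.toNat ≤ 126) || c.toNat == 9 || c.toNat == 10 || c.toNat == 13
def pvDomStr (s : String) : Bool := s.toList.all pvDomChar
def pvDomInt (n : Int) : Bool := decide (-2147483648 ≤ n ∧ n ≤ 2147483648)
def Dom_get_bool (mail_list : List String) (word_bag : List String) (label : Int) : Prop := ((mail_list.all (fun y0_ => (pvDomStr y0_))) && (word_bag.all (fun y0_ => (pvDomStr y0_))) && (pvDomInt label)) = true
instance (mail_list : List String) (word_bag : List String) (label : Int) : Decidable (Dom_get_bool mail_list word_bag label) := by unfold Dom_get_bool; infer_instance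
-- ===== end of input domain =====

-- B replaces A's per-mail membership scan of the whole bag by a bag-index dict and
-- per-mail scatter of 1s into a preallocated zero row (objective: faster).

-- ===== PORT A =====
def get_bool (mail_list : List String) (word_bag : List String) (label : Int) : List (List Int) × Int :=
  (mail_list.foldl (fun word_bool mail =>
      let word_list := PySem.Str.split₀ mail
      word_bool ++ [word_bag.foldl (fun mail_bool i =>
          mail_bool ++ [if word_list.contains i then (1 : Int) else 0]) []]) [],
   label)

-- ===== PORT B =====
def get_bool_alt (mail_list : List String) (word_bag : List String) (label : Int) : List (List Int) × Int :=
  let cols : PySem.Dict String (List Nat) :=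
    word_bag.zipIdx.foldl (fun d p => d.modify p.1 [] (· ++ [p.2])) PySem.Dict.empty
  let n := word_bag.length
  (mail_list.foldl (fun word_bool mail =>
      let row := (PySem.Str.split₀ mail).foldl
          (fun r w => (cols.getD w []).foldl (fun r j => r.set j 1) r)
          (List.replicate n (0 : Int))
      word_bool ++ [row]) [],
   label)

-- ===== PRECONDITION & SPEC =====
def Spec_get_bool (mail_list : List String) (word_bag : List String) (label : Int) (out : List (List Int) × Int) : Prop := out = get_bool_alt mail_list word_bag label
instance (mail_list : List String) (word_bag : List String) (label : Int) (out : List (List Int) × Int) : Decidable (Spec_get_bool mail_list word_bag label out) := by unfold Spec_get_bool; infer_instance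

-- ===== CLAIM (what is proved, stated in full; the proofs are below) =====
def Claim_equal_get_bool : Prop := ∀ (mail_list : List String) (word_bag : List String) (label : Int), Dom_get_bool mail_list word_bag label → Spec_get_bool mail_list word_bag label (get_bool mail_list word_bag label)

-- ===== LEMMAS AND PROOFS =====

-- setting a list of positions to 1 preserves length
theorem pv_setOnes_length (idxs : List Nat) (r : List Int) :
    (idxs.foldl (fun r j => r.set j 1) r).length = r.length := by
  induction idxs generalizing r with
  | nil => rfl
  | cons i idxs ih => simp [List.foldl_cons, ih, List.length_set]

-- elementwise effect of the inner scatter loop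
theorem pv_setOnes_getElem (idxs : List Nat) (r : List Int) (j : Nat) (hj : j < r.length)
    (hj' : j < (idxs.foldl (fun r j => r.set j 1) r).length) :
    (idxs.foldl (fun r j => r.set j 1) r)[j] = if j ∈ idxs then 1 else r[j] := by
  induction idxs generalizing r with
  | nil => simp
  | cons i idxs ih =>
    simp only [List.foldl_cons]
    rw [ih (r.set i 1) (by simpa using hj) (by simpa [pv_setOnes_length] using hj)]
    by_cases hmem : j ∈ idxs
    · simp [hmem]
    · rcases eq_or_ne i j with h | h
      · subst h; simp
      · simp [hmem, h, Ne.symm h]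

-- length through the per-mail scatter loop
theorem pv_scatter_length (f : String → List Nat) (ws : List String) (r : List Int) :
    (ws.foldl (fun r w => (f w).foldl (fun r j => r.set j 1) r) r).length = r.length := by
  induction ws generalizing r with
  | nil => rfl
  | cons w ws ih => simp [List.foldl_cons, ih, pv_setOnes_length]

-- elementwise effect of the per-mail scatter loop
theorem pv_scatter_getElem (f : String → List Nat) (ws : List String) (r : List Int)
    (j : Nat) (hj : j < r.length)
    (hj' : j < (ws.foldl (fun r w => (f w).foldl (fun r j => r.set j 1) r) r).length) :
    (ws.foldl (fun r w => (f w).foldl (fun r j => r.set j 1) r) r)[j]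
      = if ∃ w ∈ ws, j ∈ f w then 1 else r[j] := by
  induction ws generalizing r with
  | nil => simp
  | cons w ws ih =>
    simp only [List.foldl_cons]
    rw [ih ((f w).foldl (fun r j => r.set j 1) r) (by simpa [pv_setOnes_length] using hj)
        (by simpa [pv_scatter_length, pv_setOnes_length] using hj')]
    rw [pv_setOnes_getElem _ _ j hj (by simpa [pv_setOnes_length] using hj)]
    by_cases h1 : ∃ x ∈ ws, j ∈ f x
    · simp [h1]
    · by_cases h2 : j ∈ f w <;> simp [h1, h2]

-- the bag-index dict maps w to exactly the columns j with word_bag[j] = w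
theorem pv_cols_getD (word_bag : List String) (w : String) (j : Nat) :
    j ∈ ((word_bag.zipIdx.foldl (fun d p => d.modify p.1 [] (· ++ [p.2]))
          (PySem.Dict.empty : PySem.Dict String (List Nat))).getD w [])
      ↔ ∃ h : j < word_bag.length, word_bag[j] = w := by
  rw [PySem.Dict.getD_foldl_modify_append]
  simp only [PySem.Dict.getD_empty, List.nil_append, List.mem_map, List.mem_filter]
  constructor
  · rintro ⟨⟨w', i⟩, ⟨hmem, heq⟩, rfl⟩
    simp only [beq_iff_eq] at heq
    obtain ⟨hi, hx⟩ := List.mem_zipIdx' hmem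
    exact ⟨hi, by rw [← hx, heq]⟩
  · rintro ⟨hlt, rfl⟩
    have hz : (word_bag[j], j) ∈ word_bag.zipIdx := by
      have := List.getElem_mem (l := word_bag.zipIdx) (n := j) (by simpa using hlt)
      simpa [List.getElem_zipIdx] using this
    exact ⟨(word_bag[j], j), ⟨hz, by simp⟩, rfl⟩

-- one mail's row: scatter over the mail's words equals A's per-bag membership row
theorem pv_row_eq (word_bag : List String) (ws : List String) :
    (ws.foldl (fun r w =>
        (((word_bag.zipIdx.foldl (fun d p => d.modify p.1 [] (· ++ [p.2]))
            (PySem.Dict.empty : PySem.Dict String (List Nat))).getD w []).foldl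
          (fun r j => r.set j 1) r))
      (List.replicate word_bag.length (0 : Int)))
    = word_bag.map (fun i => if ws.contains i then (1 : Int) else 0) := by
  apply List.ext_getElem
  · simp [pv_scatter_length]
  · intro j h1 h2
    rw [pv_scatter_getElem _ ws _ j (by simpa [pv_scatter_length] using h1) h1]
    have hjlt : j < word_bag.length := by simpa [pv_scatter_length] using h1
    simp only [List.getElem_map, List.getElem_replicate]
    by_cases hc : word_bag[j] ∈ ws
    · have : ∃ w ∈ ws, j ∈ ((word_bag.zipIdx.foldl (fun d p => d.modify p.1 [] (· ++ [p.2]))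
          (PySem.Dict.empty : PySem.Dict String (List Nat))).getD w []) :=
        ⟨word_bag[j], hc, (pv_cols_getD word_bag _ j).mpr ⟨hjlt, rfl⟩⟩
      simp [this, hc]
    · have : ¬ ∃ w ∈ ws, j ∈ ((word_bag.zipIdx.foldl (fun d p => d.modify p.1 [] (· ++ [p.2]))
          (PySem.Dict.empty : PySem.Dict String (List Nat))).getD w []) := by
        rintro ⟨w, hw, hj⟩
        obtain ⟨hlt2, heq⟩ := (pv_cols_getD word_bag w j).mp hj
        exact hc (heq ▸ hw)
      simp [this, hc]

-- ===== VERDICT (by name: the statement is the Claim_ definition above) =====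
theorem get_bool_spec : Claim_equal_get_bool := by
  intro mail_list word_bag label _
  unfold Spec_get_bool get_bool get_bool_alt
  simp only [Prod.mk.injEq, and_true]
  rw [PySem.List.foldl_append_singleton_eq_map, PySem.List.foldl_append_singleton_eq_map,
    List.nil_append, List.nil_append]
  apply List.map_congr_left
  intro mail _
  rw [PySem.List.foldl_append_singleton_eq_map, List.nil_append]
  exact (pv_row_eq word_bag (PySem.Str.split₀ mail)).symm
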